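-- pv_equiv track=rewrite | github.com/Kresin/TextMining | src/main.py | extract_house_number_from_text
-- ===== SOURCE A (Python) =====
-- def extract_house_number_from_text(text):
--     number = ""
--     found_number = False
--     for char in text:
--         if found_number is True and char.isnumeric() is False:
--             break
--         if char.isnumeric():
--             number += char
--             found_number = True
--     return number
-- ===== SOURCE B (Python) =====
-- def extract_house_number_from_text(text):
--     # Two-pointer scan: find the start of the first digit run, then its end,
--     # and return that slice (no accumulator, no flag).
--     i = 0
--     while i < len(text) and not text[i].isnumeric():
--         i += 1
--     j = i
--     while j < len(text) and text[j].isnumeric():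
--         j += 1
--     return text[i:j]
-- ===== Notes on version B (the rewrite author's own statement) =====
-- stated objective: simpler
-- what changed: Replaces the per-character flag-and-accumulator loop (with break) by a two-pointer index scan that locates the first digit run's start and end and returns that slice of the input.
import Mathlib
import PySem

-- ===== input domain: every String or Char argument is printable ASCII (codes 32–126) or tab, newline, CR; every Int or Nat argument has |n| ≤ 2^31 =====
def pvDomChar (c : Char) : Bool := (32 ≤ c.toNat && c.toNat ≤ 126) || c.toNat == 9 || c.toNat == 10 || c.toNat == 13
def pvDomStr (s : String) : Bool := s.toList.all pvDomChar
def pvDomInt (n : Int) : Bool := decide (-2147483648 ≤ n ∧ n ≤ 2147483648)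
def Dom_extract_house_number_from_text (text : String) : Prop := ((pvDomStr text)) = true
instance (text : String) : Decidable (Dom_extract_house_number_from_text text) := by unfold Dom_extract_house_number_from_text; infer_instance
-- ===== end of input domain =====

-- B replaces A's flag-and-accumulator loop by a two-pointer index scan returning a slice; objective: simpler.
-- isnumeric is ported as PySem.Chars.isdigit — exact on the ASCII domain Dom.

-- ===== PORT A =====
-- the for-loop with `break`, state (number, found_number)
def pvGoA : List Char → List Char → Bool → List Char
  | [], number, _ => number
  | c :: cs, number, found =>
    if found && !(PySem.Chars.isdigit c) then number
    else if PySem.Chars.isdigit c then pvGoA cs (number ++ [c]) true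
    else pvGoA cs number found

def extract_house_number_from_text (text : String) : String :=
  String.ofList (pvGoA text.toList [] false)

-- ===== PORT B =====
-- first while loop: advance i while text[i] is not numeric
def pvScanStart (cs : List Char) (i : Nat) : Nat :=
  if h : i < cs.length then
    if !(PySem.Chars.isdigit cs[i]) then pvScanStart cs (i + 1) else i
  else i
termination_by cs.length - i

-- second while loop: advance j while text[j] is numeric
def pvScanEnd (cs : List Char) (j : Nat) : Nat :=
  if h : j < cs.length then
    if PySem.Chars.isdigit cs[j] then pvScanEnd cs (j + 1) else j
  else j
termination_by cs.length - j

def extract_house_number_from_text_alt (text : String) : String :=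
  let i := pvScanStart text.toList 0
  let j := pvScanEnd text.toList i
  PySem.Str.slice text (some (i : Int)) (some (j : Int))

-- ===== PRECONDITION & SPEC =====
def Spec_extract_house_number_from_text (text : String) (out : String) : Prop := out = extract_house_number_from_text_alt text
instance (text : String) (out : String) : Decidable (Spec_extract_house_number_from_text text out) := by unfold Spec_extract_house_number_from_text; infer_instance

-- ===== CLAIM (what is proved, stated in full; the proofs are below) =====
def Claim_equal_extract_house_number_from_text : Prop := ∀ (text : String), Dom_extract_house_number_from_text text → Spec_extract_house_number_from_text text (extract_house_number_from_text text)

-- ===== LEMMAS AND PROOFS =====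

theorem pvGoA_true (cs : List Char) (acc : List Char) :
    pvGoA cs acc true = acc ++ cs.takeWhile PySem.Chars.isdigit := by
  induction cs generalizing acc with
  | nil => simp [pvGoA]
  | cons c cs ih =>
    by_cases h : PySem.Chars.isdigit c
    · simp [pvGoA, h, ih]
    · simp [pvGoA, h]

theorem pvGoA_false (cs : List Char) :
    pvGoA cs [] false =
      (cs.dropWhile (fun c => !PySem.Chars.isdigit c)).takeWhile PySem.Chars.isdigit := by
  induction cs with
  | nil => simp [pvGoA]
  | cons c cs ih =>
    by_cases h : PySem.Chars.isdigit c
    · simp [pvGoA, h, pvGoA_true]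
    · simp [pvGoA, h, ih]

theorem pvScanStart_eq (cs : List Char) (i : Nat) :
    pvScanStart cs i = i + ((cs.drop i).takeWhile (fun c => !PySem.Chars.isdigit c)).length := by
  fun_induction pvScanStart cs i with
  | case1 i h hd ih =>
    rw [ih, List.drop_eq_getElem_cons h, List.takeWhile_cons]
    simp only [hd, if_true]
    simp; omega
  | case2 i h hd =>
    rw [List.drop_eq_getElem_cons h, List.takeWhile_cons]
    simp_all
  | case3 i h =>
    rw [List.drop_eq_nil_of_le (by omega)]
    simp

theorem pvScanEnd_eq (cs : List Char) (j : Nat) :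
    pvScanEnd cs j = j + ((cs.drop j).takeWhile PySem.Chars.isdigit).length := by
  fun_induction pvScanEnd cs j with
  | case1 j h hd ih =>
    rw [ih, List.drop_eq_getElem_cons h, List.takeWhile_cons]
    simp only [hd, if_true]
    simp; omega
  | case2 j h hd =>
    rw [List.drop_eq_getElem_cons h, List.takeWhile_cons]
    simp_all
  | case3 j h =>
    rw [List.drop_eq_nil_of_le (by omega)]
    simp

theorem pv_drop_length_takeWhile (p : Char → Bool) (l : List Char) :
    l.drop (l.takeWhile p).length = l.dropWhile p := by
  induction l with
  | nil => simp
  | cons a l ih =>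
    by_cases h : p a
    · simpa [List.takeWhile_cons, List.dropWhile_cons, h] using ih
    · simp [h]

theorem alt_toList (text : String) :
    (extract_house_number_from_text_alt text).toList =
      ((text.toList.dropWhile (fun c => !PySem.Chars.isdigit c)).takeWhile PySem.Chars.isdigit) := by
  unfold extract_house_number_from_text_alt
  have hi : pvScanStart text.toList 0 =
      ((text.toList.takeWhile (fun c => !PySem.Chars.isdigit c)).length) := by
    simpa using pvScanStart_eq text.toList 0
  have hdrop : text.toList.drop (pvScanStart text.toList 0) =
      text.toList.dropWhile (fun c => !PySem.Chars.isdigit c) := by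
    rw [hi, pv_drop_length_takeWhile]
  rw [PySem.Str.toList_slice]
  simp only [PySem.Chars.slice_eq_listSlice]
  rw [pvScanEnd_eq, Nat.cast_add, PySem.List.slice_natCast_add, hdrop]
  exact (List.prefix_iff_eq_take.mp (List.takeWhile_prefix _)).symm

-- ===== VERDICT (by name: the statement is the Claim_ definition above) =====
theorem extract_house_number_from_text_spec : Claim_equal_extract_house_number_from_text := by
  intro text _
  unfold Spec_extract_house_number_from_text
  have h : (extract_house_number_from_text text).toList = (extract_house_number_from_text_alt text).toList := by
    rw [alt_toList]
    simp [extract_house_number_from_text, pvGoA_false]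
  calc extract_house_number_from_text text
      = String.ofList (extract_house_number_from_text text).toList := by
        rw [String.ofList_toList]
    _ = String.ofList (extract_house_number_from_text_alt text).toList := by rw [h]
    _ = extract_house_number_from_text_alt text := by rw [String.ofList_toList]
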